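-- pv_equiv track=rewrite | github.com/QML-Group/HQEC | hqec/operator_push/presets/htn.py | find_split_tuples
-- ===== SOURCE A (Python) =====
-- def find_split_tuples(tensor_tuples, split_numbers):
--     # Sort the split numbers in descending order
--     split_numbers_sorted = sorted(split_numbers, reverse=True)
--
--     # Record split tuple pairs
--     split_tuples = []
--
--     # Iterate through each tuple pair
--     for tensor_tuple in tensor_tuples:
--         # Get the two tensor IDs of the current tuple
--         tensor_id_1, tensor_id_2 = tensor_tuple
--
--         # Initialize split interval indices
--         split_index_1 = split_index_2 = None
--
--         # Find the split intervals for each tensor ID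
--         for index, number in enumerate(split_numbers_sorted):
--             if tensor_id_1 >= number:
--                 split_index_1 = index
--                 break
--         for index, number in enumerate(split_numbers_sorted):
--             if tensor_id_2 >= number:
--                 split_index_2 = index
--                 break
--
--         # Check if the two tensor IDs are in different intervals
--         if split_index_1 != split_index_2:
--             # If they are not in the same interval, add the tuple pair to the split_tuples list
--             split_tuples.append(tensor_tuple)
--
--     return split_tuples
-- ===== SOURCE B (Python) =====
-- def _count_le(asc, x):
--     # number of elements of the ascending-sorted list asc that are <= x (binary search)
--     lo, hi = 0, len(asc)
--     while lo < hi: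
--         mid = (lo + hi) // 2
--         if asc[mid] <= x:
--             lo = mid + 1
--         else:
--             hi = mid
--     return lo
--
--
-- def find_split_tuples(tensor_tuples, split_numbers):
--     asc = sorted(split_numbers)
--     return [t for t in tensor_tuples if _count_le(asc, t[0]) != _count_le(asc, t[1])]
-- ===== Notes on version B (the rewrite author's own statement) =====
-- stated objective: faster
-- what changed: Replaces the per-ID linear scan over the descending-sorted split list by a hand-written binary search (count of split numbers <= id) on the ascending-sorted list, filtering pairs whose counts differ.
import Mathlib
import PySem

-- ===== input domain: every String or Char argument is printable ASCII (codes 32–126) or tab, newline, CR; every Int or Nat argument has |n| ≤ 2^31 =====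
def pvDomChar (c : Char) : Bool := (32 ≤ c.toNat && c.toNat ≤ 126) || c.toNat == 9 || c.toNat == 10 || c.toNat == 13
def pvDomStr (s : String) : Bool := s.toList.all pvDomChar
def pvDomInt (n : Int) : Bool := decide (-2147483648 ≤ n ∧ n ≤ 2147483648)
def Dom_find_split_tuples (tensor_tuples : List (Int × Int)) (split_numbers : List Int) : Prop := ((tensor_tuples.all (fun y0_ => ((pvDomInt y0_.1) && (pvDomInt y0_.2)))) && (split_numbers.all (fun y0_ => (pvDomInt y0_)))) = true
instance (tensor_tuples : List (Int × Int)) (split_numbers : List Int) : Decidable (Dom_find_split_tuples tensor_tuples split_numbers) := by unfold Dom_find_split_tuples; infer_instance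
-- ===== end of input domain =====

-- B replaces A's per-ID linear scan of the descending-sorted split list by a binary
-- search (count of split numbers ≤ id) on the ascending-sorted list: objective = faster.

-- ===== PORT A =====

-- the inner 'for index, number in enumerate(...): if tid >= number: ...; break' loop
def findSplitIndex : List Int → Int → Int → Option Int
  | [], _, _ => none
  | n :: rest, tid, idx => if tid ≥ n then some idx else findSplitIndex rest tid (idx + 1)

def find_split_tuples (tensor_tuples : List (Int × Int)) (split_numbers : List Int) : List (Int × Int) :=
  let split_numbers_sorted := PySem.List.sorted split_numbers (fun x => x) true
  tensor_tuples.foldl (fun split_tuples t =>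
    let split_index_1 := findSplitIndex split_numbers_sorted t.1 0
    let split_index_2 := findSplitIndex split_numbers_sorted t.2 0
    if split_index_1 ≠ split_index_2 then split_tuples ++ [t] else split_tuples) []

-- ===== PORT B =====

-- midpoint bounds, needed by bsLoop's termination proof
theorem bs_mid_bounds (lo hi : Int) (h : lo < hi) :
    lo ≤ PySem.Int.floordiv (lo + hi) 2 ∧ PySem.Int.floordiv (lo + hi) 2 < hi := by
  constructor
  · rw [PySem.Int.le_floordiv_iff_mul_le (by omega)]; omega
  · rw [PySem.Int.floordiv_lt_iff_lt_mul (by omega)]; omega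

-- the 'while lo < hi' binary-search loop of _count_le
def bsLoop (asc : List Int) (x : Int) (lo hi : Int) : Int :=
  if h : lo < hi then
    let mid := PySem.Int.floordiv (lo + hi) 2
    if (PySem.List.pyGet? asc mid).getD 0 ≤ x then bsLoop asc x (mid + 1) hi
    else bsLoop asc x lo mid
  else lo
termination_by (hi - lo).toNat
decreasing_by
  · have := bs_mid_bounds lo hi h; omega
  · have := bs_mid_bounds lo hi h; omega

def count_le (asc : List Int) (x : Int) : Int := bsLoop asc x 0 (asc.length : Int)

def find_split_tuples_alt (tensor_tuples : List (Int × Int)) (split_numbers : List Int) : List (Int × Int) :=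
  let asc := PySem.List.sorted split_numbers (fun x => x) false
  tensor_tuples.filter (fun t => count_le asc t.1 != count_le asc t.2)

-- ===== PRECONDITION & SPEC =====
def Spec_find_split_tuples (tensor_tuples : List (Int × Int)) (split_numbers : List Int) (out : List (Int × Int)) : Prop := out = find_split_tuples_alt tensor_tuples split_numbers
instance (tensor_tuples : List (Int × Int)) (split_numbers : List Int) (out : List (Int × Int)) : Decidable (Spec_find_split_tuples tensor_tuples split_numbers out) := by unfold Spec_find_split_tuples; infer_instance

-- ===== CLAIM (what is proved, stated in full; the proofs are below) =====
def Claim_equal_find_split_tuples : Prop := ∀ (tensor_tuples : List (Int × Int)) (split_numbers : List Int), Dom_find_split_tuples tensor_tuples split_numbers → Spec_find_split_tuples tensor_tuples split_numbers (find_split_tuples tensor_tuples split_numbers)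

-- ===== LEMMAS AND PROOFS =====

-- if the predicate '≤ x' holds exactly on the first k positions, countP is k
theorem countP_le_of_split (x : Int) : ∀ (l : List Int) (k : Nat), k ≤ l.length →
    (∀ i (hi : i < l.length), (l[i] ≤ x ↔ i < k)) →
    l.countP (fun n => decide (n ≤ x)) = k := by
  intro l
  induction l with
  | nil => intro k hk _; simpa using (Nat.le_zero.mp hk).symm
  | cons a t ih =>
    intro k hk h
    match k with
    | 0 =>
      have ha : ¬ a ≤ x := by
        have := h 0 (by simp); simpa using this
      have ht : t.countP (fun n => decide (n ≤ x)) = 0 := by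
        apply ih 0 (Nat.zero_le _)
        intro i hi
        have := h (i + 1) (by simpa using Nat.succ_lt_succ hi)
        simpa using this
      simp [List.countP_cons_of_neg, ha, ht]
    | k' + 1 =>
      have ha : a ≤ x := by
        have := (h 0 (by simp)).mpr (Nat.succ_pos k'); simpa using this
      have ht : t.countP (fun n => decide (n ≤ x)) = k' := by
        apply ih k' (by simpa using hk)
        intro i hi
        have := h (i + 1) (by simpa using Nat.succ_lt_succ hi)
        simpa [Nat.succ_lt_succ_iff] using this
      simp [List.countP_cons_of_pos, ha, ht]

-- binary-search loop invariant: bsLoop computes the count of elements ≤ x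
theorem bsLoop_eq (asc : List Int) (x : Int) (hs : asc.Pairwise (· ≤ ·)) :
    ∀ (fuel : Nat) (lo hi : Int), (hi - lo).toNat = fuel →
    0 ≤ lo → lo ≤ hi → hi ≤ (asc.length : Int) →
    (∀ i (hi' : i < asc.length), i < lo.toNat → asc[i] ≤ x) →
    (∀ i (hi' : i < asc.length), hi.toNat ≤ i → x < asc[i]) →
    bsLoop asc x lo hi = ((asc.countP (fun n => decide (n ≤ x)) : Nat) : Int) := by
  have hmono : ∀ i j (hj : j < asc.length) (hij : i ≤ j), asc[i]'(Nat.lt_of_le_of_lt hij hj) ≤ asc[j] := by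
    intro i j hj hij
    rcases Nat.lt_or_ge i j with hlt | hge
    · exact (List.pairwise_iff_getElem.mp hs) i j (Nat.lt_of_le_of_lt hij hj) hj hlt
    · have : i = j := le_antisymm hij hge
      subst this
      exact le_refl _
  intro fuel
  induction fuel using Nat.strong_induction_on with
  | _ fuel ih =>
    intro lo hi hfuel h0 hlh hhl hlow hhigh
    rw [bsLoop]
    by_cases h : lo < hi
    · simp only [h, dite_true]
      have hmb := bs_mid_bounds lo hi h
      set mid := PySem.Int.floordiv (lo + hi) 2 with hmid
      have hmid0 : 0 ≤ mid := le_trans h0 hmb.1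
      have hmidlen : mid < (asc.length : Int) := lt_of_lt_of_le hmb.2 hhl
      have hmidlt : mid.toNat < asc.length := by omega
      have hget : (PySem.List.pyGet? asc mid).getD 0 = asc[mid.toNat] := by
        rw [PySem.List.pyGet?_eq_some_getElem asc hmid0 hmidlen]; rfl
      rw [hget]
      by_cases hc : asc[mid.toNat] ≤ x
      · simp only [hc, if_true]
        apply ih (hi - (mid + 1)).toNat (by omega) (mid + 1) hi (rfl) (by omega) (by omega) hhl
        · intro i hi' hilt
          have hile : i ≤ mid.toNat := by omega
          exact le_trans (hmono i mid.toNat hmidlt hile) hc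
        · exact hhigh
      · simp only [hc, if_false]
        push_neg at hc
        apply ih (mid - lo).toNat (by omega) lo mid (rfl) h0 (by omega) (le_of_lt hmidlen)
        · exact hlow
        · intro i hi' hige
          exact lt_of_lt_of_le hc (hmono mid.toNat i hi' (by omega))
    · simp only [h, dite_false]
      have hlohi : lo = hi := le_antisymm hlh (not_lt.mp h)
      subst hlohi
      have : asc.countP (fun n => decide (n ≤ x)) = lo.toNat := by
        apply countP_le_of_split x asc lo.toNat (by omega)
        intro i hi'
        constructor
        · intro hle
          by_contra hge
          exact absurd hle (not_le.mpr (hhigh i hi' (by omega)))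
        · exact hlow i hi'
      rw [this]; omega

-- count_le on a sorted list is countP (· ≤ x)
theorem count_le_eq (asc : List Int) (x : Int) (hs : asc.Pairwise (· ≤ ·)) :
    count_le asc x = ((asc.countP (fun n => decide (n ≤ x)) : Nat) : Int) := by
  unfold count_le
  apply bsLoop_eq asc x hs _ 0 (asc.length : Int) rfl (le_refl 0) (by omega) (le_refl _)
  · intro i _ hlt; omega
  · intro i hi' hge; omega

-- A's inner scan on a descending-sorted list: none if all elements exceed tid,
-- else the count of elements strictly greater than tid (plus the start index k)
theorem findSplitIndex_eq (tid : Int) : ∀ (d : List Int) (k : Int),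
    d.Pairwise (fun a b => b ≤ a) →
    findSplitIndex d tid k =
      if ∀ n ∈ d, tid < n then none
      else some (k + ((d.countP (fun n => decide (tid < n)) : Nat) : Int)) := by
  intro d
  induction d with
  | nil => intro k _; simp [findSplitIndex]
  | cons n rest ih =>
    intro k hp
    have hrest : rest.Pairwise (fun a b => b ≤ a) := hp.of_cons
    have hhead : ∀ m ∈ rest, m ≤ n := fun m hm => List.rel_of_pairwise_cons hp hm
    rw [findSplitIndex]
    by_cases hc : tid ≥ n
    · simp only [hc, if_true]
      have hall : ¬ (∀ m ∈ n :: rest, tid < m) := by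
        intro hcontra
        exact absurd (hcontra n (List.mem_cons_self)) (not_lt.mpr hc)
      have hcnt : (n :: rest).countP (fun m => decide (tid < m)) = 0 := by
        rw [List.countP_eq_zero]
        intro m hm
        rcases List.mem_cons.mp hm with h1 | h2
        · subst h1; simpa using hc
        · simpa using le_trans (hhead m h2) hc
      rw [if_neg hall, hcnt]
      simp
    · simp only [hc, if_false]
      push_neg at hc
      rw [ih (k + 1) hrest]
      have hcnt : (n :: rest).countP (fun m => decide (tid < m)) =
          rest.countP (fun m => decide (tid < m)) + 1 := by
        simp [hc]
      by_cases hall : ∀ m ∈ rest, tid < m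
      · have : ∀ m ∈ n :: rest, tid < m := by
          intro m hm
          rcases List.mem_cons.mp hm with h1 | h2
          · subst h1; exact hc
          · exact hall m h2
        rw [if_pos hall, if_pos this]
      · have : ¬ ∀ m ∈ n :: rest, tid < m := by
          intro hcontra
          exact hall (fun m hm => hcontra m (List.mem_cons_of_mem n hm))
        rw [if_neg hall, if_neg this, hcnt]
        congr 1
        push_cast
        ring

-- per-ID bridge: A's interval index as a function of B's count
theorem index_vs_count (split_numbers : List Int) (tid : Int) :
    findSplitIndex (PySem.List.sorted split_numbers (fun x => x) true) tid 0 =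
      (if split_numbers.countP (fun n => decide (n ≤ tid)) = 0 then none
       else some (((split_numbers.length : Nat) : Int) -
         ((split_numbers.countP (fun n => decide (n ≤ tid)) : Nat) : Int))) := by
  set d := PySem.List.sorted split_numbers (fun x => x) true with hd
  have hperm : d.Perm split_numbers := PySem.List.sorted_perm split_numbers (fun x => x) true
  have hpair : d.Pairwise (fun a b => b ≤ a) := by
    have := PySem.List.sorted_pairwise_rev split_numbers (fun x => x)
    simpa using this
  rw [findSplitIndex_eq tid d 0 hpair]
  have hcnt_gt : d.countP (fun n => decide (tid < n)) = split_numbers.countP (fun n => decide (tid < n)) :=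
    hperm.countP_eq _
  have hcnt_le : d.countP (fun n => decide (n ≤ tid)) = split_numbers.countP (fun n => decide (n ≤ tid)) :=
    hperm.countP_eq _
  have hsplit : split_numbers.countP (fun n => decide (tid < n)) +
      split_numbers.countP (fun n => decide (n ≤ tid)) = split_numbers.length := by
    have h := List.length_eq_countP_add_countP (p := fun n => decide (tid < n)) (l := split_numbers)
    have h2 : split_numbers.countP (fun a => decide ¬decide (tid < a) = true) =
        split_numbers.countP (fun n => decide (n ≤ tid)) := by
      apply List.countP_congr
      intro n _
      simp [not_lt]
    omega
  have hle_len : split_numbers.countP (fun n => decide (n ≤ tid)) ≤ split_numbers.length :=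
    List.countP_le_length
  by_cases hall : ∀ n ∈ d, tid < n
  · have h0 : split_numbers.countP (fun n => decide (n ≤ tid)) = 0 := by
      rw [← hcnt_le, List.countP_eq_zero]
      intro n hn
      simpa using not_le.mpr (hall n hn)
    rw [if_pos hall, if_pos h0]
  · have h0 : split_numbers.countP (fun n => decide (n ≤ tid)) ≠ 0 := by
      intro hz
      apply hall
      intro n hn
      have := List.countP_eq_zero.mp (hcnt_le.trans hz) n hn
      simpa using not_le.mp (fun hle => this (by simpa using hle))
    rw [if_neg hall, if_neg h0, hcnt_gt]
    congr 1
    omega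

-- the two kept-conditions agree elementwise
theorem cond_eq (split_numbers : List Int) (t : Int × Int) :
    (decide (findSplitIndex (PySem.List.sorted split_numbers (fun x => x) true) t.1 0 ≠
             findSplitIndex (PySem.List.sorted split_numbers (fun x => x) true) t.2 0)) =
    (count_le (PySem.List.sorted split_numbers (fun x => x) false) t.1 !=
     count_le (PySem.List.sorted split_numbers (fun x => x) false) t.2) := by
  set asc := PySem.List.sorted split_numbers (fun x => x) false with hasc
  have hpair : asc.Pairwise (· ≤ ·) := by
    have := PySem.List.sorted_pairwise split_numbers (fun x => x)
    simpa using this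
  have hperm : asc.Perm split_numbers := PySem.List.sorted_perm split_numbers (fun x => x) false
  have hcl : ∀ tid, count_le asc tid = ((split_numbers.countP (fun n => decide (n ≤ tid)) : Nat) : Int) := by
    intro tid
    rw [count_le_eq asc tid hpair, hperm.countP_eq]
  rw [index_vs_count, index_vs_count, hcl, hcl]
  set c1 := split_numbers.countP (fun n => decide (n ≤ t.1)) with h1
  set c2 := split_numbers.countP (fun n => decide (n ≤ t.2)) with h2
  have hl1 : c1 ≤ split_numbers.length := List.countP_le_length
  have hl2 : c2 ≤ split_numbers.length := List.countP_le_length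
  by_cases e1 : c1 = 0 <;> by_cases e2 : c2 = 0
  · simp [e1, e2]
  · simp [e1, e2]
    try omega
  · simp [e1, e2]
    try omega
  · simp [e1, e2]
    rcases eq_or_ne c1 c2 with hc | hc
    · simp [hc]
    · have hc' : (c1 : Int) ≠ (c2 : Int) := by exact_mod_cast hc
      simp [hc, hc']

-- ===== VERDICT (by name: the statement is the Claim_ definition above) =====
theorem find_split_tuples_spec : Claim_equal_find_split_tuples := by
  intro tensor_tuples split_numbers _
  unfold Spec_find_split_tuples find_split_tuples find_split_tuples_alt
  rw [PySem.List.foldl_append_ite_eq_filter]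
  simp only [List.nil_append]
  rw [List.filter_congr]
  intro t _
  exact cond_eq split_numbers t
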